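-- pv_equiv track=rewrite | github.com/Chandrima-04/HMM_Viterbi_AT_CG_region_Detection | HMM-Exam.py | transition_prob
-- ===== SOURCE A (Python) =====
-- def transition_prob(sequence):
--     prev = 0
--     one_one, one_two, two_one, two_two = 0,0,0,0
--     for i in range(len(sequence)):
--         if sequence[i]==0 and prev==0:
--             one_one +=1
--         elif sequence[i]==1 and prev==0:
--             two_one +=1
--         elif sequence[i]==0 and prev==1:
--             one_two +=1
--         elif sequence[i]==1 and prev==1:
--             two_two +=1
--         prev = sequence[i]
--     return one_one, one_two, two_one, two_two
-- ===== SOURCE B (Python) =====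
-- def transition_prob(sequence):
--     # Run-length encode the 0-prefixed sequence with a two-pointer scan,
--     # then derive the four transition counts from runs and run boundaries.
--     xs = [0] + list(sequence)
--     runs = []
--     i, n = 0, len(xs)
--     while i < n:
--         j = i + 1
--         while j < n and xs[j] == xs[i]:
--             j += 1
--         runs.append((xs[i], j - i))
--         i = j
--     bounds = [(u, v) for (u, _), (v, _) in zip(runs, runs[1:])]
--     one_one = sum(L - 1 for v, L in runs if v == 0)
--     two_two = sum(L - 1 for v, L in runs if v == 1)
--     two_one = bounds.count((0, 1))
--     one_two = bounds.count((1, 0))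
--     return one_one, one_two, two_one, two_two
-- ===== Notes on version B (the rewrite author's own statement) =====
-- stated objective: alternative
-- what changed: Replaces A's element-by-element if-elif counting with run-length encoding of the 0-prefixed sequence via a two-pointer scan, deriving diagonal counts as sums of (run length - 1) and off-diagonal counts from run boundaries.
import Mathlib
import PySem

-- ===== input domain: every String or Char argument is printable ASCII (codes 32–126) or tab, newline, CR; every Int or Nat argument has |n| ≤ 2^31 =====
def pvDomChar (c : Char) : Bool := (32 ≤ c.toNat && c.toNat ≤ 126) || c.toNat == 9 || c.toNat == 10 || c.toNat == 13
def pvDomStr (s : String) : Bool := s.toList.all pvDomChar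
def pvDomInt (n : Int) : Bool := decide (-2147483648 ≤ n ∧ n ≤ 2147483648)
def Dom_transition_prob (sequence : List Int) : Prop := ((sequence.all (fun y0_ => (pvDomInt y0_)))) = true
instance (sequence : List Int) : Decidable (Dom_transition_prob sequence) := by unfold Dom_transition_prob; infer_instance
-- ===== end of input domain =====

-- B replaces A's per-element if-elif counting with run-length encoding of the
-- 0-prefixed sequence (two-pointer scan) and derives the four counts from run
-- lengths and run boundaries (objective: alternative algorithm).

-- ===== PORT A =====
-- A's loop over range(len(sequence)) indexing sequence[i], carrying state
-- (prev, one_one, one_two, two_one, two_two); ported as a fold over the elements.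
def transition_prob (sequence : List Int) : Int × Int × Int × Int :=
  let st := sequence.foldl
    (fun (st : Int × Int × Int × Int × Int) x =>
      let (prev, one_one, one_two, two_one, two_two) := st
      if x = 0 ∧ prev = 0 then (x, one_one + 1, one_two, two_one, two_two)
      else if x = 1 ∧ prev = 0 then (x, one_one, one_two, two_one + 1, two_two)
      else if x = 0 ∧ prev = 1 then (x, one_one, one_two + 1, two_one, two_two)
      else if x = 1 ∧ prev = 1 then (x, one_one, one_two, two_one, two_two + 1)
      else (x, one_one, one_two, two_one, two_two))
    (0, 0, 0, 0, 0)
  (st.2.1, st.2.2.1, st.2.2.2.1, st.2.2.2.2)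

-- ===== PORT B =====
-- Source B's two-pointer while loop over xs: each outer step takes the maximal run
-- of the current head (the inner 'while xs[j] == xs[i]' = takeWhile/dropWhile
-- on the suffix) and records (value, run length); exact on every input.
def pvRuns : List Int → List (Int × Int)
  | [] => []
  | x :: xs =>
      (x, 1 + ((xs.takeWhile (fun y => y == x)).length : Int)) ::
        pvRuns (xs.dropWhile (fun y => y == x))
termination_by l => l.length
decreasing_by
  simpa using Nat.lt_succ_of_le (List.length_dropWhile_le _ _)

def transition_prob_alt (sequence : List Int) : Int × Int × Int × Int :=
  let runs := pvRuns ((0 : Int) :: sequence)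
  let bounds := (runs.zip runs.tail).map (fun p => (p.1.1, p.2.1))
  let one_one := ((runs.filter (fun p => p.1 == 0)).map (fun p => p.2 - 1)).sum
  let two_two := ((runs.filter (fun p => p.1 == 1)).map (fun p => p.2 - 1)).sum
  let two_one := (bounds.count ((0 : Int), (1 : Int)) : Int)
  let one_two := (bounds.count ((1 : Int), (0 : Int)) : Int)
  (one_one, one_two, two_one, two_two)

-- ===== PRECONDITION & SPEC =====
def Spec_transition_prob (sequence : List Int) (out : Int × Int × Int × Int) : Prop := out = transition_prob_alt sequence
instance (sequence : List Int) (out : Int × Int × Int × Int) : Decidable (Spec_transition_prob sequence out) := by unfold Spec_transition_prob; infer_instance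

-- ===== CLAIM (what is proved, stated in full; the proofs are below) =====
def Claim_equal_transition_prob : Prop := ∀ (sequence : List Int), Dom_transition_prob sequence → Spec_transition_prob sequence (transition_prob sequence)

-- ===== LEMMAS AND PROOFS =====

-- the loop body of A's fold, named for the proof
def pvStepA (st : Int × Int × Int × Int × Int) (x : Int) : Int × Int × Int × Int × Int :=
  let (prev, one_one, one_two, two_one, two_two) := st
  if x = 0 ∧ prev = 0 then (x, one_one + 1, one_two, two_one, two_two)
  else if x = 1 ∧ prev = 0 then (x, one_one, one_two, two_one + 1, two_two)
  else if x = 0 ∧ prev = 1 then (x, one_one, one_two + 1, two_one, two_two)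
  else if x = 1 ∧ prev = 1 then (x, one_one, one_two, two_one, two_two + 1)
  else (x, one_one, one_two, two_one, two_two)

-- A's fold accumulates exactly the pair counts of zip (prev::seq) seq
theorem pvLoop_eq (seq : List Int) : ∀ (prev a b c d : Int),
    seq.foldl pvStepA (prev, a, b, c, d) =
      ((prev :: seq).getLast (by simp),
       a + ((List.zip (prev :: seq) seq).count ((0 : Int), (0 : Int)) : Int),
       b + ((List.zip (prev :: seq) seq).count ((1 : Int), (0 : Int)) : Int),
       c + ((List.zip (prev :: seq) seq).count ((0 : Int), (1 : Int)) : Int),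
       d + ((List.zip (prev :: seq) seq).count ((1 : Int), (1 : Int)) : Int)) := by
  induction seq with
  | nil => intro prev a b c d; simp
  | cons x rest ih =>
    intro prev a b c d
    have hz : List.zip (prev :: x :: rest) (x :: rest) = (prev, x) :: List.zip (x :: rest) rest := by
      simp [List.zip]
    rw [List.foldl_cons]
    have hstep : pvStepA (prev, a, b, c, d) x =
        if x = 0 ∧ prev = 0 then (x, a + 1, b, c, d)
        else if x = 1 ∧ prev = 0 then (x, a, b, c + 1, d)
        else if x = 0 ∧ prev = 1 then (x, a, b + 1, c, d)
        else if x = 1 ∧ prev = 1 then (x, a, b, c, d + 1)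
        else (x, a, b, c, d) := rfl
    rw [hstep, hz]
    have hlast : (prev :: x :: rest).getLast (by simp) = (x :: rest).getLast (by simp) := by
      simp [List.getLast]
    split_ifs with h1 h2 h3 h4
    all_goals simp_all [List.count_cons, Prod.ext_iff]
    all_goals omega

-- zip of a list starting with a run of x's decomposes into (x,x) pairs plus the tail zip
theorem pvZipRun (x : Int) (p r : List Int) (hp : ∀ y ∈ p, y = x) :
    (x :: (p ++ r)).zip (p ++ r) =
      List.replicate p.length ((x, x) : Int × Int) ++ (x :: r).zip r := by
  induction p with
  | nil => simp
  | cons z p' ih =>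
    have hz : z = x := hp z (by simp)
    subst hz
    simp only [List.cons_append, List.zip_cons_cons]
    exact congrArg _ (ih (fun y hy => hp y (by simp [hy])))

-- first element of dropWhile fails the predicate
theorem pvDropWhileHead (x : Int) (xs : List Int) (y : Int) (r : List Int)
    (h : xs.dropWhile (fun z => z == x) = y :: r) : y ≠ x := by
  intro hyx
  have := List.head?_dropWhile_not (p := fun z => z == x) (l := xs)
  rw [h] at this
  simp [hyx] at this

-- the zip of the 0-prefixed list splits at the first run
theorem pvZipSplit (x : Int) (xs : List Int) :
    (x :: xs).zip xs =
      List.replicate (xs.takeWhile (fun z => z == x)).length ((x, x) : Int × Int) ++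
        (x :: xs.dropWhile (fun z => z == x)).zip (xs.dropWhile (fun z => z == x)) := by
  have hpmem : ∀ y ∈ xs.takeWhile (fun z => z == x), y = x := by
    intro y hy
    simpa using List.mem_takeWhile_imp hy
  conv_lhs => rw [← List.takeWhile_append_dropWhile (p := fun z => z == x) (l := xs)]
  exact pvZipRun x _ _ hpmem

-- the diagonal count (a,a) of pairs equals the sum of (run length - 1) over runs of value a
theorem pvDiag (l : List Int) (a : Int) :
    (((pvRuns l).filter (fun p => p.1 == a)).map (fun p => p.2 - 1)).sum =
      ((l.zip l.tail).count ((a, a) : Int × Int) : Int) := by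
  induction l using pvRuns.induct with
  | case1 => simp [pvRuns]
  | case2 x xs ih =>
    rw [pvRuns, List.tail_cons, pvZipSplit x xs, List.count_append]
    have hrepl : (List.replicate (xs.takeWhile (fun z => z == x)).length
        ((x, x) : Int × Int)).count ((a, a) : Int × Int) =
        if a = x then (xs.takeWhile (fun z => z == x)).length else 0 := by
      rw [List.count_replicate]
      rcases eq_or_ne a x with h | h
      · subst h; simp
      · rw [if_neg (by simp [Prod.ext_iff]; intro hc; exact absurd hc.symm h), if_neg h]
    have htl : ((x :: xs.dropWhile (fun z => z == x)).zip (xs.dropWhile (fun z => z == x))).count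
          ((a, a) : Int × Int) =
        ((xs.dropWhile (fun z => z == x)).zip (xs.dropWhile (fun z => z == x)).tail).count
          ((a, a) : Int × Int) := by
      cases hrc : xs.dropWhile (fun z => z == x) with
      | nil => simp
      | cons y r' =>
        have hy : y ≠ x := pvDropWhileHead x xs y r' hrc
        have hne : ¬ (((x, y) : Int × Int) = (a, a)) := by
          simp only [Prod.mk.injEq]
          rintro ⟨h1, h2⟩
          exact hy (h2.trans h1.symm)
        simp [hne]
    rw [hrepl, htl]
    rcases eq_or_ne x a with h | h
    · subst h
      rw [if_pos rfl]
      simp only [List.filter_cons, beq_self_eq_true, if_true, List.map_cons, List.sum_cons, ih]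
      push_cast
      ring
    · have hx : ((x, 1 + (((xs.takeWhile (fun z => z == x)).length : Int))).1 == a) = false := by
        simp [h]
      rw [if_neg (fun hh => h hh.symm)]
      simp only [List.filter_cons, hx, if_false, Bool.false_eq_true, Nat.zero_add]
      exact ih

-- off-diagonal count (a,b), a ≠ b, of pairs equals its count among run boundaries
theorem pvOff (l : List Int) (a b : Int) (hab : a ≠ b) :
    (((pvRuns l).zip (pvRuns l).tail).map (fun p => (p.1.1, p.2.1))).count ((a, b) : Int × Int) =
      (l.zip l.tail).count ((a, b) : Int × Int) := by
  induction l using pvRuns.induct with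
  | case1 => simp [pvRuns]
  | case2 x xs ih =>
    conv_rhs => rw [List.tail_cons, pvZipSplit x xs]
    rw [List.count_append]
    have hrepl : (List.replicate (xs.takeWhile (fun z => z == x)).length
        ((x, x) : Int × Int)).count ((a, b) : Int × Int) = 0 := by
      rw [List.count_replicate, if_neg]
      intro hc
      have hc2 : ((x, x) : Int × Int) = (a, b) := by simpa using hc
      rw [Prod.ext_iff] at hc2
      exact hab (by omega)
    rw [hrepl, Nat.zero_add, pvRuns]
    cases hrc : xs.dropWhile (fun z => z == x) with
    | nil => simp [pvRuns]
    | cons y r' =>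
      rw [hrc] at ih
      rw [pvRuns] at ih ⊢
      simp only [List.zip_cons_cons, List.map_cons, List.count_cons, List.tail_cons] at ih ⊢
      omega

theorem transition_prob_eq (seq : List Int) : transition_prob seq = transition_prob_alt seq := by
  show (let st := seq.foldl pvStepA ((0:Int), 0, 0, 0, 0);
        (st.2.1, st.2.2.1, st.2.2.2.1, st.2.2.2.2)) = transition_prob_alt seq
  rw [pvLoop_eq seq 0 0 0 0 0]
  unfold transition_prob_alt
  dsimp only
  have h00 := pvDiag ((0 : Int) :: seq) 0
  have h11 := pvDiag ((0 : Int) :: seq) 1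
  have h01 := pvOff ((0 : Int) :: seq) 0 1 (by norm_num)
  have h10 := pvOff ((0 : Int) :: seq) 1 0 (by norm_num)
  rw [List.tail_cons] at h00 h11 h01 h10
  rw [h00, h11, h01, h10]
  simp

-- ===== VERDICT (by name: the statement is the Claim_ definition above) =====
theorem transition_prob_spec : Claim_equal_transition_prob := by
  intro s _
  unfold Spec_transition_prob
  exact transition_prob_eq s
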